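-- pv_equiv track=rewrite | github.com/debdavid/guardian | utils/audit_log.py | get_legislation_reference
-- ===== SOURCE A (Python) =====
-- def get_legislation_reference(findings: list) -> str:
--     """
--     Returns the most relevant legislation reference
--     based on what PII was found.
--
--     Why automate this?
--     A DQO shouldn't need to remember which law applies
--     to which PII type. Guardian surfaces it automatically
--     so every audit entry is legally grounded from the start.
--     """
--
--     # Check for the highest-risk categories first
--     # Order matters - we return the most serious legislation
--     categories = [f['category'] for f in findings]
--
--     if 'AUTaxFileNumber' in categories:
--         return(
--             "Privacy Act 1988 (Cth) - Tax File Number Rule; "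
--             "Information Privacy Act 2009 (Qld) - IPP 4"
--         )
--
--     if 'AUMedicareNumber' in categories:
--         return (
--             "Privacy Act 1988 (Cth) - APP 11; "
--             "Information PRivacy Act 2009 (Qld) - IPP 4"
--         )
--
--     if any(c in categories for c in [
--         'CreditCardNumber',
--         'AUBankAccountNumber'
--     ]):
--         return (
--             "Privacy Act 1988 (Cth) - APP 11; "
--             "Notifiable Data Breaches Scheme"
--         )
--
--     if any(c in categories for c in [
--         'Person', 'Address', 'PhoneNumber', 'Email'
--     ]):
--         return "Information Privacy Act 2009 (Qld) - IPP 1, IPP 4"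
--
--     # Default if nothing specific matched
--     return "Information Privacy Act 2009 (Qld) - IPP 4"
-- ===== SOURCE B (Python) =====
-- RANK = {
--     'AUTaxFileNumber': 0,
--     'AUMedicareNumber': 1,
--     'CreditCardNumber': 2,
--     'AUBankAccountNumber': 2,
--     'Person': 3,
--     'Address': 3,
--     'PhoneNumber': 3,
--     'Email': 3,
-- }
--
-- LAWS = [
--     "Privacy Act 1988 (Cth) - Tax File Number Rule; "
--     "Information Privacy Act 2009 (Qld) - IPP 4",
--     "Privacy Act 1988 (Cth) - APP 11; "
--     "Information PRivacy Act 2009 (Qld) - IPP 4",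
--     "Privacy Act 1988 (Cth) - APP 11; "
--     "Notifiable Data Breaches Scheme",
--     "Information Privacy Act 2009 (Qld) - IPP 1, IPP 4",
--     "Information Privacy Act 2009 (Qld) - IPP 4",
-- ]
--
-- def get_legislation_reference(findings: list) -> str:
--     """Single pass computing the minimum severity rank, then one table lookup."""
--     best = 4
--     for f in findings:
--         best = min(best, RANK.get(f['category'], 4))
--     return LAWS[best]
-- ===== Notes on version B (the rewrite author's own statement) =====
-- stated objective: alternative
-- what changed: Replaces the ordered if-cascade of membership tests over the category list with a numeric severity ranking: one fold computes the minimum rank of any finding's category and a single table lookup returns the legislation for that rank.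
import Mathlib
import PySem

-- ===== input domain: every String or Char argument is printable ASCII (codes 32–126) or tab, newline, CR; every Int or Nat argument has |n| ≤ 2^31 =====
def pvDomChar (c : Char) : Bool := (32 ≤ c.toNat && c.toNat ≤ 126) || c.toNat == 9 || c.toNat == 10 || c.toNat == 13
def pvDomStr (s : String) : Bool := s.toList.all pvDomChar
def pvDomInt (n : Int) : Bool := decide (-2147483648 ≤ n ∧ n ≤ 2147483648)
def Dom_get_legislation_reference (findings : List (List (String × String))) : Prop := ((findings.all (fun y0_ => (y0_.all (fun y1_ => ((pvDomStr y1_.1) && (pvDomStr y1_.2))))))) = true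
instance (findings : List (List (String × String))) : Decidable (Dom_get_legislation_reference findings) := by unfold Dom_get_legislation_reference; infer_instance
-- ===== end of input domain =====

-- B replaces the if-cascade of membership tests with a single fold computing the minimum
-- severity rank of the categories, then one table lookup; same value wherever A returns.

-- ===== PORT A =====
-- f['category'] on the association list: first matching key (exact under Pre_, which rules out KeyError)
def pvCategory (f : List (String × String)) : String :=
  ((f.find? (fun p => p.1 == "category")).map (·.2)).getD ""

def get_legislation_reference (findings : List (List (String × String))) : String :=
  let categories := findings.map pvCategory
  if categories.contains "AUTaxFileNumber" then
    "Privacy Act 1988 (Cth) - Tax File Number Rule; Information Privacy Act 2009 (Qld) - IPP 4"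
  else if categories.contains "AUMedicareNumber" then
    "Privacy Act 1988 (Cth) - APP 11; Information PRivacy Act 2009 (Qld) - IPP 4"
  else if ["CreditCardNumber", "AUBankAccountNumber"].any (fun c => categories.contains c) then
    "Privacy Act 1988 (Cth) - APP 11; Notifiable Data Breaches Scheme"
  else if ["Person", "Address", "PhoneNumber", "Email"].any (fun c => categories.contains c) then
    "Information Privacy Act 2009 (Qld) - IPP 1, IPP 4"
  else
    "Information Privacy Act 2009 (Qld) - IPP 4"

-- ===== PORT B =====
def pvRankTable : PySem.Dict String Int :=
  PySem.Dict.ofList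
    [ ("AUTaxFileNumber", 0), ("AUMedicareNumber", 1),
      ("CreditCardNumber", 2), ("AUBankAccountNumber", 2),
      ("Person", 3), ("Address", 3), ("PhoneNumber", 3), ("Email", 3) ]

def pvLaws : List String :=
  [ "Privacy Act 1988 (Cth) - Tax File Number Rule; Information Privacy Act 2009 (Qld) - IPP 4",
    "Privacy Act 1988 (Cth) - APP 11; Information PRivacy Act 2009 (Qld) - IPP 4",
    "Privacy Act 1988 (Cth) - APP 11; Notifiable Data Breaches Scheme",
    "Information Privacy Act 2009 (Qld) - IPP 1, IPP 4",
    "Information Privacy Act 2009 (Qld) - IPP 4" ]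

def get_legislation_reference_alt (findings : List (List (String × String))) : String :=
  let best : Int :=
    findings.foldl (fun b f => min b (PySem.Dict.getD pvRankTable (pvCategory f) 4)) 4
  ((PySem.List.pyGet? pvLaws best).getD "")

-- ===== PRECONDITION & SPEC =====
-- Pre_ excludes findings lacking a 'category' key, where Python A (and B) raise KeyError.
def Pre_get_legislation_reference (findings : List (List (String × String))) : Prop :=
  findings.all (fun f => f.any (fun p => p.1 == "category")) = true
instance (findings : List (List (String × String))) : Decidable (Pre_get_legislation_reference findings) := by unfold Pre_get_legislation_reference; infer_instance
def pvWitness_get_legislation_reference : (List (List (String × String))) :=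
  [[("category", "Person"), ("text", "Jane")], [("category", "Email")]]

def Spec_get_legislation_reference (findings : List (List (String × String))) (out : String) : Prop := out = get_legislation_reference_alt findings
instance (findings : List (List (String × String))) (out : String) : Decidable (Spec_get_legislation_reference findings out) := by unfold Spec_get_legislation_reference; infer_instance

-- ===== CLAIM =====
def Claim_equal_get_legislation_reference : Prop := ∀ (findings : List (List (String × String))), Dom_get_legislation_reference findings → Pre_get_legislation_reference findings → Spec_get_legislation_reference findings (get_legislation_reference findings)

-- ===== LEMMAS AND PROOFS =====

-- rank of one category, closed form
set_option maxRecDepth 4096 in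
theorem rank_char (c : String) :
    PySem.Dict.getD pvRankTable c 4 =
      if c = "AUTaxFileNumber" then 0
      else if c = "AUMedicareNumber" then 1
      else if c = "CreditCardNumber" ∨ c = "AUBankAccountNumber" then 2
      else if c = "Person" ∨ c = "Address" ∨ c = "PhoneNumber" ∨ c = "Email" then 3
      else 4 := by
  have hmk : pvRankTable = PySem.Dict.mk
      [ ("AUTaxFileNumber", 0), ("AUMedicareNumber", 1),
        ("CreditCardNumber", 2), ("AUBankAccountNumber", 2),
        ("Person", 3), ("Address", 3), ("PhoneNumber", 3), ("Email", 3) ] := rfl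
  rw [PySem.Dict.getD_eq_get?_getD, hmk]
  simp only [PySem.Dict.get?_mk_cons, beq_iff_eq]
  split_ifs <;> try rfl
  all_goals (try (exfalso; subst_vars; simp_all; done))
  all_goals (try (exfalso; rcases ‹_ ∨ _ ∨ _ ∨ _› with h | h | h | h <;> (subst h; simp_all)))
  all_goals (exfalso; rcases ‹_ ∨ _› with h | h <;> (subst h; simp_all))

-- the fold computing a running minimum, characterised by ≤
theorem foldl_min_le_iff {α : Type} (g : α → Int) (l : List α) (b k : Int) :
    l.foldl (fun b f => min b (g f)) b ≤ k ↔ b ≤ k ∨ ∃ f ∈ l, g f ≤ k := by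
  induction l generalizing b with
  | nil => simp
  | cons x xs ih => simp [ih, or_assoc]

theorem ex_rank_le (cats : List String) (k : Int) (hk : k = 0 ∨ k = 1 ∨ k = 2 ∨ k = 3) :
    (∃ c ∈ cats, PySem.Dict.getD pvRankTable c 4 ≤ k) ↔
      ("AUTaxFileNumber" ∈ cats
       ∨ (1 ≤ k ∧ "AUMedicareNumber" ∈ cats)
       ∨ (2 ≤ k ∧ ("CreditCardNumber" ∈ cats ∨ "AUBankAccountNumber" ∈ cats))
       ∨ (3 ≤ k ∧ ("Person" ∈ cats ∨ "Address" ∈ cats ∨ "PhoneNumber" ∈ cats ∨ "Email" ∈ cats))) := by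
  constructor
  · rintro ⟨c, hc, hle⟩
    rw [rank_char] at hle
    split_ifs at hle with h1 h2 h3 h4
    · exact Or.inl (h1 ▸ hc)
    · exact Or.inr (Or.inl ⟨hle, h2 ▸ hc⟩)
    · rcases h3 with h | h
      · exact Or.inr (Or.inr (Or.inl ⟨hle, Or.inl (h ▸ hc)⟩))
      · exact Or.inr (Or.inr (Or.inl ⟨hle, Or.inr (h ▸ hc)⟩))
    · rcases h4 with h | h | h | h <;> subst h <;>
        exact Or.inr (Or.inr (Or.inr ⟨hle, by tauto⟩))
    · omega
  · rintro (h | ⟨hk1, h⟩ | ⟨hk2, h | h⟩ | ⟨hk3, h | h | h | h⟩) <;>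
      exact ⟨_, h, by rw [rank_char]; simp; omega⟩

-- ===== VERDICT =====
theorem get_legislation_reference_spec : Claim_equal_get_legislation_reference := by
  intro findings _ _
  unfold Spec_get_legislation_reference get_legislation_reference get_legislation_reference_alt
  set cats := findings.map pvCategory with hcats
  have hfold : findings.foldl (fun b f => min b (PySem.Dict.getD pvRankTable (pvCategory f) 4)) 4
      = cats.foldl (fun b c => min b (PySem.Dict.getD pvRankTable c 4)) 4 := by
    rw [hcats, List.foldl_map]
  rw [hfold]
  set best := cats.foldl (fun b c => min b (PySem.Dict.getD pvRankTable c 4)) 4 with hbest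
  have h4 : best ≤ 4 := by
    rw [hbest]; exact (foldl_min_le_iff _ _ _ _).mpr (Or.inl le_rfl)
  have key : ∀ k : Int, k = 0 ∨ k = 1 ∨ k = 2 ∨ k = 3 →
      (best ≤ k ↔
        ("AUTaxFileNumber" ∈ cats
         ∨ (1 ≤ k ∧ "AUMedicareNumber" ∈ cats)
         ∨ (2 ≤ k ∧ ("CreditCardNumber" ∈ cats ∨ "AUBankAccountNumber" ∈ cats))
         ∨ (3 ≤ k ∧ ("Person" ∈ cats ∨ "Address" ∈ cats ∨ "PhoneNumber" ∈ cats ∨ "Email" ∈ cats)))) := by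
    intro k hk
    rw [hbest, foldl_min_le_iff]
    have h4k : ¬ (4 : Int) ≤ k := by omega
    simp only [h4k, false_or]
    exact ex_rank_le cats k hk
  by_cases hC1 : "AUTaxFileNumber" ∈ cats
  · have hb : best = 0 := by
      have h0 : best ≤ 0 := (key 0 (by omega)).mpr (Or.inl hC1)
      have hlb : ¬ best ≤ -1 := by
        intro h
        obtain ⟨c, hc, hr⟩ := ((foldl_min_le_iff _ _ _ _).mp (hbest ▸ h)).resolve_left (by omega)
        rw [rank_char] at hr; split_ifs at hr <;> omega
      omega
    rw [if_pos (List.elem_eq_true_of_mem hC1), hb]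
    rfl
  · by_cases hC2 : "AUMedicareNumber" ∈ cats
    · have hb : best = 1 := by
        have h1 : best ≤ 1 := (key 1 (by omega)).mpr (Or.inr (Or.inl ⟨by omega, hC2⟩))
        have h0 : ¬ best ≤ 0 := by
          intro h
          rcases (key 0 (by omega)).mp h with h | ⟨hk, _⟩ | ⟨hk, _⟩ | ⟨hk, _⟩
          · exact hC1 h
          all_goals omega
        omega
      rw [if_neg (by simp [hC1]), if_pos (List.elem_eq_true_of_mem hC2), hb]
      rfl
    · by_cases hC3 : "CreditCardNumber" ∈ cats ∨ "AUBankAccountNumber" ∈ cats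
      · have hb : best = 2 := by
          have h2 : best ≤ 2 := (key 2 (by omega)).mpr (Or.inr (Or.inr (Or.inl ⟨by omega, hC3⟩)))
          have h1 : ¬ best ≤ 1 := by
            intro h
            rcases (key 1 (by omega)).mp h with h | ⟨_, h⟩ | ⟨hk, _⟩ | ⟨hk, _⟩
            · exact hC1 h
            · exact hC2 h
            all_goals omega
          omega
        rw [if_neg (by simp [hC1]), if_neg (by simp [hC2]), if_pos (by simp; tauto), hb]
        rfl
      · by_cases hC4 : "Person" ∈ cats ∨ "Address" ∈ cats ∨ "PhoneNumber" ∈ cats ∨ "Email" ∈ cats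
        · have hb : best = 3 := by
            have h3 : best ≤ 3 := (key 3 (by omega)).mpr (Or.inr (Or.inr (Or.inr ⟨by omega, hC4⟩)))
            have h2 : ¬ best ≤ 2 := by
              intro h
              rcases (key 2 (by omega)).mp h with h | ⟨_, h⟩ | ⟨_, h⟩ | ⟨hk, _⟩
              · exact hC1 h
              · exact hC2 h
              · exact hC3 h
              · omega
            omega
          rw [if_neg (by simp [hC1]), if_neg (by simp [hC2]), if_neg (by
            rw [not_or] at hC3; simp [hC3.1, hC3.2]), if_pos (by simp; tauto), hb]
          rfl
        · have hb : best = 4 := by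
            have h3 : ¬ best ≤ 3 := by
              intro h
              rcases (key 3 (by omega)).mp h with h | ⟨_, h⟩ | ⟨_, h⟩ | ⟨_, h⟩
              · exact hC1 h
              · exact hC2 h
              · exact hC3 h
              · exact hC4 h
            omega
          rw [not_or] at hC3
          rw [not_or, not_or, not_or] at hC4
          rw [if_neg (by simp [hC1]), if_neg (by simp [hC2]), if_neg (by
            simp [hC3.1, hC3.2]), if_neg (by
            simp [hC4.1, hC4.2.1, hC4.2.2.1, hC4.2.2.2]), hb]
          rfl
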